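-- pv_equiv track=rewrite | github.com/bissli/libb-util | src/libb/util.py | backfill
-- ===== SOURCE A (Python) =====
-- def backfill(values):
--     """Back-fill a sorted array with the latest value
--
--     >>> backfill([None, None, 1, 2, 3, None, 4])
--     [1, 1, 1, 2, 3, 3, 4]
--     >>> backfill([1,2,3])
--     [1, 2, 3]
--     >>> backfill([None, None, None])
--     [None, None, None]
--     >>> backfill([])
--     []
--     >>> backfill([1, 2, 3, None])
--     [1, 2, 3, 3]
--     """
--     latest = None
--     missing = 0  # at start
--     filled = []
--     for val in values:
--         if val is not None:
--             latest = val
--             if missing: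
--                 filled = [latest] * missing
--                 missing = 0
--             filled.append(val)
--         else:
--             if latest is None:
--                 missing += 1
--             else:
--                 filled.append(latest)
--     return filled or values
-- ===== SOURCE B (Python) =====
-- def backfill(values):
--     """Back-fill with the latest non-null value: forward-fill pass, then a
--     short front pass for leading Nones; all-None/empty input returned as is."""
--     if not any(v is not None for v in values):
--         return values
--     out = list(values)
--     last = None
--     for i in range(len(out)):
--         if out[i] is None:
--             out[i] = last
--         else:
--             last = out[i]
--     first = next(v for v in out if v is not None)
--     i = 0
--     while out[i] is None:
--         out[i] = first
--         i += 1
--     return out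
-- ===== Notes on version B (the rewrite author's own statement) =====
-- stated objective: alternative
-- what changed: Replaces A's single pass with a pending-missing counter and list-rebuild by an any() emptiness test plus two differently shaped passes over a copy: a forward-fill pass carrying the last non-null value, then a short front pass overwriting the leading Nones with the first non-null value.
import Mathlib
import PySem

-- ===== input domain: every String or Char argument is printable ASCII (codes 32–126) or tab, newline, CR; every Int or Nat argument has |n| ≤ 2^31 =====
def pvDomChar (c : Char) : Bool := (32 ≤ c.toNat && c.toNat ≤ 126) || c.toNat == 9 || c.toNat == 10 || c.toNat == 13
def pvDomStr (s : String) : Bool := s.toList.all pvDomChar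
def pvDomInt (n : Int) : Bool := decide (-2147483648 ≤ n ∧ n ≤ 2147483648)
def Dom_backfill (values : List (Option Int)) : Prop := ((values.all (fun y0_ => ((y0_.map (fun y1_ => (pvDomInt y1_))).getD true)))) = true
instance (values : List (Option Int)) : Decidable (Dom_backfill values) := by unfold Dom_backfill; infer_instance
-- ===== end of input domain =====

-- B is an alternative decomposition (any-test + forward-fill pass + leading-None pass),
-- equivalent to A on all inputs; equivalence is about the return value (neither mutates its input).

-- ===== PORT A =====
-- state = (latest, missing, filled), exactly A's loop variables
def aStep (s : Option Int × Nat × List (Option Int)) (val : Option Int) :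
    Option Int × Nat × List (Option Int) :=
  match val with
  | some v =>
      let latest := some v
      let (filled, missing) :=
        if s.2.1 ≠ 0 then (List.replicate s.2.1 latest, 0) else (s.2.2, s.2.1)
      (latest, missing, filled ++ [some v])
  | none =>
      match s.1 with
      | none => (none, s.2.1 + 1, s.2.2)
      | some l => (some l, s.2.1, s.2.2 ++ [some l])

def backfill (values : List (Option Int)) : List (Option Int) :=
  let r := values.foldl aStep (none, 0, [])
  if r.2.2 = [] then values else r.2.2   -- `return filled or values`

-- ===== PORT B =====
-- forward pass: each None slot becomes `last`, each non-None updates `last`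
def ffill (last : Option Int) : List (Option Int) → List (Option Int)
  | [] => []
  | none :: t => last :: ffill last t
  | some v :: t => some v :: ffill (some v) t

-- front pass: overwrite leading Nones with `first`, stop at the first non-None
def fillLead (first : Option Int) : List (Option Int) → List (Option Int)
  | [] => []
  | none :: t => first :: fillLead first t
  | some v :: t => some v :: t

def backfill_alt (values : List (Option Int)) : List (Option Int) :=
  if values.any (fun v => v.isSome) = false then values
  else
    let out := ffill none values
    match out.findSome? id with      -- `next(v for v in out if v is not None)`
    | some f => fillLead (some f) out
    | none => out                    -- unreachable: some element is non-None

-- ===== PRECONDITION & SPEC =====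
def Spec_backfill (values : List (Option Int)) (out : List (Option Int)) : Prop := out = backfill_alt values
instance (values : List (Option Int)) (out : List (Option Int)) : Decidable (Spec_backfill values out) := by unfold Spec_backfill; infer_instance

-- ===== CLAIM (what is proved, stated in full; the proofs are below) =====
def Claim_equal_backfill : Prop := ∀ (values : List (Option Int)), Dom_backfill values → Spec_backfill values (backfill values)

-- ===== LEMMAS AND PROOFS =====

-- A's loop over an all-None list just counts
lemma aStep_allNone (l : List (Option Int)) (m : Nat)
    (h : ∀ x ∈ l, x = none) :
    l.foldl aStep (none, m, []) = (none, m + l.length, []) := by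
  induction l generalizing m with
  | nil => simp
  | cons x t ih =>
      have hx : x = none := h x (by simp)
      subst hx
      simp only [List.foldl_cons, aStep, List.length_cons]
      rw [ih (m + 1) (fun y hy => h y (List.mem_cons_of_mem _ hy))]
      have : m + 1 + t.length = m + (t.length + 1) := by omega
      rw [this]

-- once `latest` is non-None, A's loop appends exactly `ffill (some lv) l`
lemma aStep_some (l : List (Option Int)) (lv : Int) (acc : List (Option Int)) :
    ∃ p : Option Int,
      l.foldl aStep (some lv, 0, acc) = (p, 0, acc ++ ffill (some lv) l) := by
  induction l generalizing lv acc with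
  | nil => exact ⟨some lv, by simp [ffill]⟩
  | cons x t ih =>
      cases x with
      | none =>
          obtain ⟨p, hp⟩ := ih lv (acc ++ [some lv])
          exact ⟨p, by simp [aStep, hp, ffill]⟩
      | some v =>
          obtain ⟨p, hp⟩ := ih v (acc ++ [some v])
          exact ⟨p, by simp [aStep, hp, ffill]⟩

-- the forward pass keeps an all-None prefix unchanged
lemma ffill_none_append (l r : List (Option Int)) (h : ∀ x ∈ l, x = none) :
    ffill none (l ++ r) = l ++ ffill none r := by
  induction l with
  | nil => rfl
  | cons x t ih =>
      have hx : x = none := h x (by simp)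
      subst hx
      simp only [List.cons_append, ffill]
      rw [ih (fun y hy => h y (List.mem_cons_of_mem _ hy))]

lemma findSome?_allNone_append (l r : List (Option Int)) (v : Int)
    (h : ∀ x ∈ l, x = none) :
    (l ++ some v :: r).findSome? id = some v := by
  induction l with
  | nil => simp
  | cons x t ih =>
      have hx : x = none := h x (by simp)
      subst hx
      simp only [List.cons_append, List.findSome?, id]
      exact ih (fun y hy => h y (List.mem_cons_of_mem _ hy))

lemma fillLead_allNone_append (l r : List (Option Int)) (v : Int)
    (h : ∀ x ∈ l, x = none) :
    fillLead (some v) (l ++ some v :: r) = List.replicate l.length (some v) ++ some v :: r := by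
  induction l with
  | nil => simp [fillLead]
  | cons x t ih =>
      have hx : x = none := h x (by simp)
      subst hx
      simp only [List.cons_append, fillLead, List.length_cons, List.replicate_succ]
      rw [ih (fun y hy => h y (List.mem_cons_of_mem _ hy))]

lemma split_of_not_allNone (values : List (Option Int))
    (h : values.any (fun v => v.isSome) = true) :
    ∃ l v r, values = l ++ some v :: r ∧ ∀ x ∈ l, x = none := by
  induction values with
  | nil => simp at h
  | cons x t ih =>
      cases x with
      | some v => exact ⟨[], v, t, by simp⟩
      | none =>
          have ht : t.any (fun v => v.isSome) = true := by simpa using h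
          obtain ⟨l, v, r, hv, hl⟩ := ih ht
          refine ⟨none :: l, v, r, by simp [hv], ?_⟩
          intro y hy
          rcases List.mem_cons.mp hy with h1 | h2
          · exact h1
          · exact hl y h2

lemma allNone_of_any_false (values : List (Option Int))
    (h : values.any (fun v => v.isSome) = false) : ∀ x ∈ values, x = none := by
  intro x hx
  cases x with
  | none => rfl
  | some v =>
      exfalso
      have := List.any_eq_false.mp h (some v) hx
      simp at this

-- ===== VERDICT (by name: the statement is the Claim_ definition above) =====
theorem backfill_spec : Claim_equal_backfill := by
  intro values _
  unfold Spec_backfill backfill backfill_alt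
  cases hA : values.any (fun v => v.isSome) with
  | false =>
      have h := allNone_of_any_false values hA
      rw [aStep_allNone values 0 h]
      simp
  | true =>
      obtain ⟨l, v, r, hv, hl⟩ := split_of_not_allNone values hA
      subst hv
      have hstep : aStep (none, 0 + l.length, []) (some v)
          = (some v, 0, List.replicate l.length (some v) ++ [some v]) := by
        cases l with
        | nil => simp [aStep]
        | cons a t => simp [aStep]
      obtain ⟨p, hp⟩ := aStep_some r v (List.replicate l.length (some v) ++ [some v])
      rw [List.foldl_append, aStep_allNone l 0 hl, List.foldl_cons, hstep, hp]
      simp only [ffill_none_append l _ hl, ffill]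
      rw [findSome?_allNone_append l _ v hl]
      simp [fillLead_allNone_append l (ffill (some v) r) v hl]
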